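-- pv_equiv track=rewrite | github.com/rllaskowski/jonasz_zajecia | 30-05-2020/parzystosc.py | czyParzysta
-- ===== SOURCE A (Python) =====
-- def czyParzysta(a, b, k):
--     liczby = [a % 2, b % 2 ]
--
--     for i in range(2, k):
--         liczby.append((liczby[i-2] + liczby[i-1]) % 2)
--     if liczby[k-1] == 0:
--         return True
--     else:
--         return False
-- ===== SOURCE B (Python) =====
-- def czyParzysta(a, b, k):
--     # Parities of the Fibonacci-like sequence repeat with period 3:
--     # a, b, a+b, a, b, a+b, ...  so term k-1 is read off in O(1).
--     cycle = [a % 2, b % 2, (a + b) % 2]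
--     return cycle[(k - 1) % 3] == 0
-- ===== Notes on version B (the rewrite author's own statement) =====
-- stated objective: faster
-- what changed: Replaced the O(k) loop that materialises the whole parity sequence with the O(1) closed form using the period-3 parity cycle [a, b, a+b] indexed by (k-1) mod 3.
-- intended difference: For the degenerate queries k=0 and k=-1 (where the term does not exist), A's liczby[k-1] wraps around by Python negative indexing and returns the parity of b resp. a, while B returns the value of the period-3 cycle at (k-1) mod 3 ((a+b) resp. b), the consistent periodic extension of the sequence; D_ holds exactly when these two parities disagree. — e.g. on czyParzysta(1, 0, 0): A returns true, B returns false
import Mathlib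
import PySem

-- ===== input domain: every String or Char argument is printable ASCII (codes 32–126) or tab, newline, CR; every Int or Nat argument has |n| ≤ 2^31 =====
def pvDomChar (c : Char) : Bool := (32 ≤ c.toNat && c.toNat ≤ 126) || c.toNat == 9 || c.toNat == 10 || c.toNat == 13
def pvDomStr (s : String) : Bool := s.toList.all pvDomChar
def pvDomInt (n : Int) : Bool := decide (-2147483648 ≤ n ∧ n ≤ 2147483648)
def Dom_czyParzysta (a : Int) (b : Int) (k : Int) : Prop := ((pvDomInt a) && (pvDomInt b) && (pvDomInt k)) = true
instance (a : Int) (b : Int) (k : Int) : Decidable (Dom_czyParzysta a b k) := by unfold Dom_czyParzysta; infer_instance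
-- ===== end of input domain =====

-- B replaces A's O(k) loop by the O(1) period-3 parity-cycle closed form.

-- ===== PORT A =====
-- The Python list 'liczby' is ported as an Array (O(1) append and index, like a Python list).
-- loop body of 'for i in range(2, k): liczby.append((liczby[i-2] + liczby[i-1]) % 2)';
-- inside the loop i ≥ 2 and both indices are in range, so .toNat and getD are exact there
def czyParzystaLoop (liczby : Array Int) (i : Int) : Array Int :=
  liczby.push (PySem.Int.mod (liczby.getD (i - 2).toNat 0 + liczby.getD (i - 1).toNat 0) 2)

def czyParzysta (a : Int) (b : Int) (k : Int) : Bool :=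
  let liczby : Array Int := #[PySem.Int.mod a 2, PySem.Int.mod b 2]
  let liczby := (PySem.List.pyRange 2 k 1).foldl czyParzystaLoop liczby
  -- liczby[k-1] is in range exactly for k ≥ -1 (= Pre_); pyGetD is exact there
  if PySem.List.pyGetD liczby.toList (k - 1) 0 == 0 then true else false

-- ===== PORT B =====
def czyParzysta_alt (a : Int) (b : Int) (k : Int) : Bool :=
  let cycle : List Int := [PySem.Int.mod a 2, PySem.Int.mod b 2, PySem.Int.mod (a + b) 2]
  -- (k-1) % 3 lies in {0,1,2}, always a valid index, so pyGetD is exact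
  PySem.List.pyGetD cycle (PySem.Int.mod (k - 1) 3) 0 == 0

-- ===== PRECONDITION & SPEC =====
-- Pre_ excludes only k ≤ -2, where A raises IndexError on liczby[k-1].
def Pre_czyParzysta (a : Int) (b : Int) (k : Int) : Prop := -1 ≤ k
instance (a : Int) (b : Int) (k : Int) : Decidable (Pre_czyParzysta a b k) := by unfold Pre_czyParzysta; infer_instance
def pvWitness_czyParzysta : Int × Int × Int := (3, 4, 7)

-- For the degenerate queries k = 0 and k = -1 (the requested term does not exist), A's
-- liczby[k-1] wraps around by Python negative indexing and returns the parity of b resp. a,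
-- while B returns the period-3 cycle value at (k-1) mod 3 ((a+b) resp. b) — the consistent
-- periodic extension of the sequence; D_ holds exactly when those two parities disagree.
def D_czyParzysta (a : Int) (b : Int) (k : Int) : Prop :=
  (k = 0 ∧ PySem.Int.mod a 2 = 1) ∨ (k = -1 ∧ PySem.Int.mod (a + b) 2 = 1)
instance (a : Int) (b : Int) (k : Int) : Decidable (D_czyParzysta a b k) := by unfold D_czyParzysta; infer_instance

def Spec_czyParzysta (a : Int) (b : Int) (k : Int) (out : Bool) : Prop :=
  ¬ D_czyParzysta a b k → out = czyParzysta_alt a b k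
instance (a : Int) (b : Int) (k : Int) (out : Bool) : Decidable (Spec_czyParzysta a b k out) := by unfold Spec_czyParzysta; infer_instance

def pvDiffWitness_czyParzysta : Int × Int × Int := (1, 0, 0)
def pvDiffWitnessOut_czyParzysta : Bool × Bool := (true, false)

-- ===== CLAIM (what is proved, stated in full; the proofs are below) =====
def Claim_unchanged_czyParzysta : Prop := ∀ (a : Int) (b : Int) (k : Int), Dom_czyParzysta a b k → Pre_czyParzysta a b k → Spec_czyParzysta a b k (czyParzysta a b k)
def Claim_changed_czyParzysta : Prop := Dom_czyParzysta (pvDiffWitness_czyParzysta.1) (pvDiffWitness_czyParzysta.2.1) (pvDiffWitness_czyParzysta.2.2) ∧ Pre_czyParzysta (pvDiffWitness_czyParzysta.1) (pvDiffWitness_czyParzysta.2.1) (pvDiffWitness_czyParzysta.2.2) ∧ D_czyParzysta (pvDiffWitness_czyParzysta.1) (pvDiffWitness_czyParzysta.2.1) (pvDiffWitness_czyParzysta.2.2) ∧ czyParzysta (pvDiffWitness_czyParzysta.1) (pvDiffWitness_czyParzysta.2.1) (pvDiffWitness_czyParzysta.2.2) = pvDiffWitnessOut_czyParzysta.1 ∧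 czyParzysta_alt (pvDiffWitness_czyParzysta.1) (pvDiffWitness_czyParzysta.2.1) (pvDiffWitness_czyParzysta.2.2) = pvDiffWitnessOut_czyParzysta.2 ∧ pvDiffWitnessOut_czyParzysta.1 ≠ pvDiffWitnessOut_czyParzysta.2
def Claim_exact_czyParzysta : Prop := ∀ (a : Int) (b : Int) (k : Int), Dom_czyParzysta a b k → Pre_czyParzysta a b k → D_czyParzysta a b k → czyParzysta a b k ≠ czyParzysta_alt a b k

-- ===== LEMMAS AND PROOFS =====

-- the period-3 parity cycle, read at position i
def pvPer (a b : Int) (i : Nat) : Int :=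
  [PySem.Int.mod a 2, PySem.Int.mod b 2, PySem.Int.mod (a + b) 2].getD (i % 3) 0

theorem pvIfBeq (c : Bool) : (if c = true then true else false) = c := by
  cases c <;> rfl

theorem pvMod2 (x : Int) : PySem.Int.mod x 2 = x % 2 :=
  PySem.Int.mod_eq_emod_of_pos (by norm_num)

theorem pvPer_step (a b : Int) (i : Nat) :
    PySem.Int.mod (pvPer a b i + pvPer a b (i + 1)) 2 = pvPer a b (i + 2) := by
  have h3 : i % 3 = 0 ∨ i % 3 = 1 ∨ i % 3 = 2 := by omega
  rcases h3 with h | h | h <;>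
    simp [pvPer, h, Nat.add_mod, pvMod2] <;> omega

theorem pvGetMap (f : Nat → Int) (m i : Nat) (h : i < m) :
    ((List.range m).map f).getD i 0 = f i := by
  simp [List.getD_eq_getElem?_getD, List.getElem?_range h]

-- the same loop body over the underlying list
def pvListStep (l : List Int) (i : Int) : List Int :=
  l ++ [PySem.Int.mod (l.getD (i - 2).toNat 0 + l.getD (i - 1).toNat 0) 2]

theorem pvToListLit (x y : Int) : (#[x, y] : Array Int).toList = [x, y] := rfl

theorem pvGetDBridge (ar : Array Int) (i : Nat) (d : Int) : ar.getD i d = ar.toList.getD i d := by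
  simp [Array.getD_eq_getD_getElem?, List.getD_eq_getElem?_getD, ← Array.getElem?_toList]

theorem pvFoldBridge (r : List Int) (ar : Array Int) :
    ((r.foldl czyParzystaLoop ar).toList) = r.foldl pvListStep ar.toList := by
  induction r generalizing ar with
  | nil => rfl
  | cons i r ih =>
      simp only [List.foldl_cons, ih, czyParzystaLoop, pvListStep,
        Array.toList_push, pvGetDBridge]

theorem pvBuild (a b : Int) (n : Nat) :
    (PySem.List.pyRange 2 (2 + (n : Int)) 1).foldl pvListStep
        [PySem.Int.mod a 2, PySem.Int.mod b 2]
      = (List.range (2 + n)).map (pvPer a b) := by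
  induction n with
  | zero =>
      rw [show (2 + ((0:Nat) : Int)) = 2 by norm_num, PySem.List.pyRange_one_eq_nil (by omega)]
      simp [pvPer, List.range_succ]
  | succ n ih =>
      have hr : PySem.List.pyRange 2 (2 + ((n + 1 : Nat) : Int)) 1
          = PySem.List.pyRange 2 (2 + (n : Int)) 1 ++ [2 + (n : Int)] := by
        rw [show (2 + ((n + 1 : Nat) : Int)) = (2 + (n : Int)) + 1 by push_cast; ring]
        exact PySem.List.pyRange_one_succ_right (by omega)
      rw [hr, List.foldl_append, ih]
      unfold pvListStep
      have e1 : ((2 + (n : Int)) - 2).toNat = n := by omega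
      have e2 : ((2 + (n : Int)) - 1).toNat = n + 1 := by omega
      rw [List.foldl_cons, List.foldl_nil, e1, e2,
        pvGetMap _ _ _ (by omega), pvGetMap _ _ _ (by omega),
        pvPer_step]
      rw [show 2 + (n + 1) = (2 + n) + 1 by ring, List.range_succ]
      simp [show 2 + n = n + 2 by ring]

-- A = B for every k ≥ 1
theorem pvMain (a b k : Int) (hk : 1 ≤ k) : czyParzysta a b k = czyParzysta_alt a b k := by
  simp only [czyParzysta, czyParzysta_alt]
  rcases eq_or_lt_of_le hk with hk1 | hk2
  · -- k = 1 : empty loop, index 0 on both sides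
    subst hk1
    rw [PySem.List.pyRange_one_eq_nil (by omega), List.foldl_nil, pvToListLit,
      show (1:Int) - 1 = 0 from by norm_num,
      show PySem.Int.mod (0:Int) 3 = 0 from by decide,
      PySem.List.pyGetD_zero_cons, PySem.List.pyGetD_zero_cons, pvIfBeq]
  · -- k ≥ 2 : characterise the built list, then read position k-1 off the cycle
    obtain ⟨n, hn⟩ : ∃ n : Nat, k = 2 + (n : Int) := ⟨(k - 2).toNat, by omega⟩
    subst hn
    rw [pvFoldBridge, pvToListLit, pvBuild a b n]
    have e2 : (2 + (n : Int)) - 1 = ((n + 1 : Nat) : Int) := by push_cast; ring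
    have e3 : PySem.Int.mod ((n + 1 : Nat) : Int) 3 = (((n + 1) % 3 : Nat) : Int) := by
      exact_mod_cast PySem.Int.mod_natCast (n + 1) 3
    rw [e2, PySem.List.pyGetD_natCast, e3, PySem.List.pyGetD_natCast,
      pvGetMap _ _ _ (by omega), pvIfBeq]
    rfl

-- negative / small literal indexings used in the k ∈ {0, -1} cases
theorem pvIdxA0 (x y : Int) : PySem.List.pyGetD [x, y] (-1) 0 = y := by
  rw [PySem.List.pyGetD_neg_ofNat [x, y] 1 0 (by norm_num) (by simp)]; simp

theorem pvIdxA1 (x y : Int) : PySem.List.pyGetD [x, y] (-2) 0 = x := by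
  rw [PySem.List.pyGetD_neg_ofNat [x, y] 2 0 (by norm_num) (by simp)]; simp

theorem pvIdx1 (x y z : Int) : PySem.List.pyGetD [x, y, z] 1 0 = y := by
  simp [PySem.List.pyGetD]

theorem pvIdx2 (x y z : Int) : PySem.List.pyGetD [x, y, z] 2 0 = z := by
  simp [PySem.List.pyGetD]

-- the two degenerate branches, reduced to a comparison of two parities
theorem pvZero (a b : Int) :
    czyParzysta a b 0 = (PySem.Int.mod b 2 == 0) ∧
    czyParzysta_alt a b 0 = (PySem.Int.mod (a + b) 2 == 0) := by
  constructor
  · simp only [czyParzysta]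
    rw [PySem.List.pyRange_one_eq_nil (by omega), List.foldl_nil, pvToListLit,
      show (0:Int) - 1 = -1 from by norm_num, pvIdxA0, pvIfBeq]
  · simp only [czyParzysta_alt]
    rw [show (0:Int) - 1 = -1 from by norm_num,
      show PySem.Int.mod (-1:Int) 3 = 2 from by decide, pvIdx2]

theorem pvNegOne (a b : Int) :
    czyParzysta a b (-1) = (PySem.Int.mod a 2 == 0) ∧
    czyParzysta_alt a b (-1) = (PySem.Int.mod b 2 == 0) := by
  constructor
  · simp only [czyParzysta]
    rw [PySem.List.pyRange_one_eq_nil (by omega), List.foldl_nil, pvToListLit,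
      show (-1:Int) - 1 = -2 from by norm_num, pvIdxA1, pvIfBeq]
  · simp only [czyParzysta_alt]
    rw [show (-1:Int) - 1 = -2 from by norm_num,
      show PySem.Int.mod (-2:Int) 3 = 1 from by decide, pvIdx1]

-- ===== VERDICT (by name: the statement is the Claim_ definition above) =====
theorem czyParzysta_spec : Claim_unchanged_czyParzysta := by
  intro a b k _ hpre hnD
  unfold Pre_czyParzysta at hpre
  by_cases h1 : 1 ≤ k
  · exact pvMain a b k h1
  · have h0 : k = 0 ∨ k = -1 := by omega
    unfold D_czyParzysta at hnD
    rcases h0 with rfl | rfl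
    · have ha : PySem.Int.mod a 2 ≠ 1 := fun h => hnD (Or.inl ⟨rfl, h⟩)
      rw [pvMod2] at ha
      have hbb : PySem.Int.mod b 2 = PySem.Int.mod (a + b) 2 := by
        rw [pvMod2, pvMod2]; omega
      rw [(pvZero a b).1, (pvZero a b).2, hbb]
    · have hab : PySem.Int.mod (a + b) 2 ≠ 1 := fun h => hnD (Or.inr ⟨rfl, h⟩)
      rw [pvMod2] at hab
      have hbb : PySem.Int.mod a 2 = PySem.Int.mod b 2 := by
        rw [pvMod2, pvMod2]; omega
      rw [(pvNegOne a b).1, (pvNegOne a b).2, hbb]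

theorem czyParzysta_changed : Claim_changed_czyParzysta := by
  unfold Claim_changed_czyParzysta; decide

theorem czyParzysta_tight : Claim_exact_czyParzysta := by
  intro a b k _ _ hD
  unfold D_czyParzysta at hD
  rcases hD with ⟨rfl, ha⟩ | ⟨rfl, hab⟩
  · rw [(pvZero a b).1, (pvZero a b).2]
    rw [pvMod2] at ha
    have h1 : b % 2 = 0 ∧ (a + b) % 2 = 1 ∨ b % 2 = 1 ∧ (a + b) % 2 = 0 := by omega
    rcases h1 with ⟨h2, h3⟩ | ⟨h2, h3⟩ <;>
      simp [pvMod2, h2, h3]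
  · rw [(pvNegOne a b).1, (pvNegOne a b).2]
    rw [pvMod2] at hab
    have h1 : a % 2 = 0 ∧ b % 2 = 1 ∨ a % 2 = 1 ∧ b % 2 = 0 := by omega
    rcases h1 with ⟨h2, h3⟩ | ⟨h2, h3⟩ <;>
      simp [pvMod2, h2, h3]
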